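-- pv_equiv track=rewrite | github.com/surlab/dendritic-distance | data_io.py | seperate_kyle_rois
-- ===== SOURCE A (Python) =====
-- def seperate_kyle_rois(kyle_rois):
--   spine_rois = []
--   dend_rois = []
--   counter=0
--   for name, roi in kyle_rois.items():
--     #plt.plot(roi['x'], roi['y'], color=color_list[counter+1])
--     if counter==0:
--       spine_rois.append(roi)
--     if counter ==2:
--       counter = 0
--       dend_rois.append(roi)
--     else:
--       counter+=1
--   return spine_rois, dend_rois
-- ===== SOURCE B (Python) =====
-- def seperate_kyle_rois(kyle_rois):
--     rois = list(kyle_rois.values())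
--     return rois[0::3], rois[2::3]
-- ===== Notes on version B (the rewrite author's own statement) =====
-- stated objective: simpler
-- what changed: Replaced the counter/branch state machine over dict items with materializing the value list once and returning the two strided slices rois[0::3] and rois[2::3] (no loop, no running state).
import Mathlib
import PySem

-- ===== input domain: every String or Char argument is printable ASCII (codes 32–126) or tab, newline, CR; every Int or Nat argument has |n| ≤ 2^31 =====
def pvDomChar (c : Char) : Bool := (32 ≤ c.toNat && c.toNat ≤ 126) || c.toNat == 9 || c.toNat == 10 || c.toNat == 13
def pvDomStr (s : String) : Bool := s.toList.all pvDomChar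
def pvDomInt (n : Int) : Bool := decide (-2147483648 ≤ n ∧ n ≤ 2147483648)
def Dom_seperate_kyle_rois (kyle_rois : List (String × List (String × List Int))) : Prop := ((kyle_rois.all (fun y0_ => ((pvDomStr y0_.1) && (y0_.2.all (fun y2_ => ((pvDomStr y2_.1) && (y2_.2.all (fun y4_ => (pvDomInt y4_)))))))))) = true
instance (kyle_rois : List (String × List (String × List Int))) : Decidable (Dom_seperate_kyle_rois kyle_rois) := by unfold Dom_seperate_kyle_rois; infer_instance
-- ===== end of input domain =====

-- B replaces A's counter/branch state machine with two strided slices rois[0::3], rois[2::3] of the value list (objective: simpler).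

-- ===== PORT A =====
-- one iteration of A's loop body: state (spine_rois, dend_rois, counter)
def pvStepA (st : List (List (String × List Int)) × List (List (String × List Int)) × Int)
    (nr : String × List (String × List Int)) :
    List (List (String × List Int)) × List (List (String × List Int)) × Int :=
  let spine := if st.2.2 = 0 then st.1 ++ [nr.2] else st.1
  if st.2.2 = 2 then (spine, st.2.1 ++ [nr.2], 0) else (spine, st.2.1, st.2.2 + 1)

def seperate_kyle_rois (kyle_rois : List (String × List (String × List Int))) : (List (List (String × List Int))) × (List (List (String × List Int))) :=
  let st := kyle_rois.foldl pvStepA ([], [], 0)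
  (st.1, st.2.1)

-- ===== PORT B =====
-- rois = list(kyle_rois.values()); return rois[0::3], rois[2::3]
-- (a slice with step 3 never fails in Python; .getD [] only discharges slice?'s step≠0 option)
def seperate_kyle_rois_alt (kyle_rois : List (String × List (String × List Int))) : (List (List (String × List Int))) × (List (List (String × List Int))) :=
  let rois := kyle_rois.map Prod.snd
  ((PySem.List.slice? rois (some 0) none 3).getD [],
   (PySem.List.slice? rois (some 2) none 3).getD [])

-- ===== PRECONDITION & SPEC =====
def Spec_seperate_kyle_rois (kyle_rois : List (String × List (String × List Int))) (out : (List (List (String × List Int))) × (List (List (String × List Int)))) : Prop := out = seperate_kyle_rois_alt kyle_rois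
instance (kyle_rois : List (String × List (String × List Int))) (out : (List (List (String × List Int))) × (List (List (String × List Int)))) : Decidable (Spec_seperate_kyle_rois kyle_rois out) := by unfold Spec_seperate_kyle_rois; infer_instance

-- ===== CLAIM (what is proved, stated in full; the proofs are below) =====
def Claim_equal_seperate_kyle_rois : Prop := ∀ (kyle_rois : List (String × List (String × List Int))), Dom_seperate_kyle_rois kyle_rois → Spec_seperate_kyle_rois kyle_rois (seperate_kyle_rois kyle_rois)

-- ===== LEMMAS AND PROOFS =====

-- every third element, starting with the first
def pvEvery3 {α : Type} : List α → List α
  | [] => []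
  | a :: rest => a :: pvEvery3 (rest.drop 2)
termination_by l => l.length
decreasing_by simp

@[simp] theorem pvEvery3_nil {α : Type} : pvEvery3 ([] : List α) = [] := by
  rw [pvEvery3.eq_def]

@[simp] theorem pvEvery3_cons {α : Type} (a : α) (rest : List α) :
    pvEvery3 (a :: rest) = a :: pvEvery3 (rest.drop 2) := by
  rw [pvEvery3.eq_def]

-- A's loop from counter 0 appends every third value (and every third starting at index 2)
theorem pvLoopA_eq (l : List (String × List (String × List Int)))
    (spine dend : List (List (String × List Int))) :
    l.foldl pvStepA (spine, dend, 0) =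
      (spine ++ pvEvery3 (l.map Prod.snd),
       dend ++ pvEvery3 ((l.map Prod.snd).drop 2),
       ((l.length % 3 : Nat) : Int)) := by
  match l with
  | [] => simp
  | [a] => simp [pvStepA]
  | [a, b] => simp [pvStepA]
  | a :: b :: c :: rest =>
      have ih := pvLoopA_eq rest (spine ++ [a.2]) (dend ++ [c.2])
      simp only [List.foldl, pvStepA] at ih ⊢
      norm_num
      rw [ih]
      simp
      omega

-- strided indexing core: picking indices 0,3,6,… out of ys is pvEvery3 ys
theorem pvStrideCore {α : Type} (ys : List α) :
    List.filterMap (fun k => ys[3 * k]?) (List.range ((ys.length + 2) / 3)) = pvEvery3 ys := by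
  match ys with
  | [] => simp
  | [a] => simp [List.range_succ]
  | [a, b] => simp [List.range_succ]
  | a :: b :: c :: rest =>
      have hlen : ((a :: b :: c :: rest).length + 2) / 3 = (rest.length + 2) / 3 + 1 := by
        simp; omega
      rw [hlen, List.range_succ_eq_map, List.filterMap_cons, List.filterMap_map]
      have hfun : ((fun k => (a :: b :: c :: rest)[3 * k]?) ∘ Nat.succ)
          = fun k => rest[3 * k]? := by
        funext k
        have h3 : 3 * Nat.succ k = 3 * k + 1 + 1 + 1 := by omega
        simp [Function.comp, h3]
      rw [hfun, pvStrideCore rest]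
      simp

-- xs[a::3] = pvEvery3 (xs.drop a) for a natural start a
theorem pvSlice3_eq {α : Type} (xs : List α) (a : Nat) :
    PySem.List.slice? xs (some (a : Int)) none 3 = some (pvEvery3 (xs.drop a)) := by
  unfold PySem.List.slice? PySem.List.sliceIndices
  have ha : ¬ ((a : Int) < 0) := by omega
  norm_num [ha]
  have hcount :
      (if a < xs.length
        then (((xs.length : Int) - min (a : Int) xs.length + 3 - 1) / 3).toNat else 0)
      = ((xs.drop a).length + 2) / 3 := by
    rw [List.length_drop]
    split <;> omega
  rw [hcount]
  have hdrop : xs.drop (min (a : Int) (xs.length : Int)).toNat = xs.drop a := by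
    rcases le_or_gt a xs.length with h | h
    · rw [min_eq_left (by exact_mod_cast h)]; simp
    · rw [min_eq_right (by exact_mod_cast h.le)]
      simp
      exact h.le
  rw [← hdrop, ← pvStrideCore (xs.drop (min (a : Int) (xs.length : Int)).toNat)]
  congr 1
  funext k
  rw [List.getElem?_drop]
  congr 1
  have hmin : (0 : Int) ≤ min (a : Int) (xs.length : Int) := by positivity
  omega

-- ===== VERDICT (by name: the statement is the Claim_ definition above) =====
theorem seperate_kyle_rois_spec : Claim_equal_seperate_kyle_rois := by
  intro kyle_rois _
  unfold Spec_seperate_kyle_rois seperate_kyle_rois seperate_kyle_rois_alt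
  have h0 := pvSlice3_eq (kyle_rois.map Prod.snd) 0
  have h2 := pvSlice3_eq (kyle_rois.map Prod.snd) 2
  rw [List.drop_zero] at h0
  push_cast at h0 h2
  rw [pvLoopA_eq]
  simp [h0, h2]
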